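-- pv_equiv track=rewrite | github.com/chrishultin/advent-of-code | 2022/day-15/puzzle.py | areas_in_range
-- ===== SOURCE A (Python) =====
-- def areas_in_range(start, distance, row):
--     areas = []
--     for x in range(start[0] - distance, start[0] + distance + 1):
--         max_y = start[1] + (distance - abs(x - start[0])) + 1
--         min_y = start[1] - (distance - abs(x - start[0]))
--         y_range = range(min_y, max_y)
--         if row in y_range:
--             areas.append((x, row))
--     return areas
-- ===== SOURCE B (Python) =====
-- def areas_in_range(start, distance, row):
--     k = distance - abs(row - start[1])
--     if k < 0:
--         return []
--     return [(x, row) for x in range(start[0] - k, start[0] + k + 1)]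
-- ===== Notes on version B (the rewrite author's own statement) =====
-- stated objective: faster
-- what changed: Instead of scanning all 2*distance+1 columns and testing row membership in each column's y-range, B solves |x-cx| <= distance-|row-cy| once and emits the contiguous x-interval directly.
import Mathlib
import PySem

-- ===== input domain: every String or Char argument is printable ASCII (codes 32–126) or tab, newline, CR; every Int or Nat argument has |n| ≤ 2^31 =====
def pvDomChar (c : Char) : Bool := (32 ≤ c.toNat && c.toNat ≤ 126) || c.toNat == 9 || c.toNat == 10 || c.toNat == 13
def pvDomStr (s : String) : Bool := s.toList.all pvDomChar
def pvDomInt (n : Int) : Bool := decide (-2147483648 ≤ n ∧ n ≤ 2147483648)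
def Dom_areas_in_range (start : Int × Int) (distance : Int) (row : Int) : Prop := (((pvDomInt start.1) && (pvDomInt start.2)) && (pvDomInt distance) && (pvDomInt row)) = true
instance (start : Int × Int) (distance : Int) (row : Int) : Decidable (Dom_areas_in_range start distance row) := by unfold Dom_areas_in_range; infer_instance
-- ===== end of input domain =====

-- B replaces A's O(distance) scan over all columns (testing row membership in each
-- column's y-range) by solving |x-cx| ≤ distance-|row-cy| directly, emitting the
-- contiguous x-interval: faster (asymptotic, O(output)).

-- ===== PORT A =====
-- `row in range(min_y, max_y)` (step 1) is exactly min_y ≤ row ∧ row < max_y.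
def areas_in_range (start : Int × Int) (distance : Int) (row : Int) : List (Int × Int) :=
  (PySem.List.pyRange (start.1 - distance) (start.1 + distance + 1) 1).foldl
    (fun areas x =>
      let max_y := start.2 + (distance - |x - start.1|) + 1
      let min_y := start.2 - (distance - |x - start.1|)
      if min_y ≤ row ∧ row < max_y then areas ++ [(x, row)] else areas) []

-- ===== PORT B =====
def areas_in_range_alt (start : Int × Int) (distance : Int) (row : Int) : List (Int × Int) :=
  let k := distance - |row - start.2|
  if k < 0 then []
  else (PySem.List.pyRange (start.1 - k) (start.1 + k + 1) 1).map (fun x => (x, row))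

-- ===== PRECONDITION & SPEC =====
def Spec_areas_in_range (start : Int × Int) (distance : Int) (row : Int) (out : List (Int × Int)) : Prop := out = areas_in_range_alt start distance row
instance (start : Int × Int) (distance : Int) (row : Int) (out : List (Int × Int)) : Decidable (Spec_areas_in_range start distance row out) := by unfold Spec_areas_in_range; infer_instance

-- ===== CLAIM (what is proved, stated in full; the proofs are below) =====
def Claim_equal_areas_in_range : Prop := ∀ (start : Int × Int) (distance : Int) (row : Int), Dom_areas_in_range start distance row → Spec_areas_in_range start distance row (areas_in_range start distance row)

-- ===== LEMMAS AND PROOFS =====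

-- filtering an integer range by a window [lo, hi] contained in [a, b) yields the window's range
theorem pv_filter_window (a b lo hi : Int) (h1 : a ≤ lo) (h2 : hi + 1 ≤ b) :
    (PySem.List.pyRange a b 1).filter (fun x => decide (lo ≤ x ∧ x ≤ hi))
      = PySem.List.pyRange lo (hi + 1) 1 := by
  by_cases hlh : lo ≤ hi + 1
  · rw [PySem.List.pyRange_one_append a lo b h1 (by omega),
        PySem.List.pyRange_one_append lo (hi + 1) b hlh h2,
        List.filter_append, List.filter_append]
    have e1 : (PySem.List.pyRange a lo 1).filter (fun x => decide (lo ≤ x ∧ x ≤ hi)) = [] := by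
      refine List.filter_eq_nil_iff.mpr (fun x hx => ?_)
      rw [PySem.List.mem_pyRange_one] at hx
      simp only [decide_eq_true_eq]
      omega
    have e2 : (PySem.List.pyRange lo (hi + 1) 1).filter (fun x => decide (lo ≤ x ∧ x ≤ hi))
        = PySem.List.pyRange lo (hi + 1) 1 := by
      refine List.filter_eq_self.mpr (fun x hx => ?_)
      rw [PySem.List.mem_pyRange_one] at hx
      simp only [decide_eq_true_eq]
      omega
    have e3 : (PySem.List.pyRange (hi + 1) b 1).filter (fun x => decide (lo ≤ x ∧ x ≤ hi)) = [] := by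
      refine List.filter_eq_nil_iff.mpr (fun x hx => ?_)
      rw [PySem.List.mem_pyRange_one] at hx
      simp only [decide_eq_true_eq]
      omega
    rw [e1, e2, e3, List.nil_append, List.append_nil]
  · rw [show PySem.List.pyRange lo (hi + 1) 1 = [] from PySem.List.pyRange_one_eq_nil (by omega)]
    refine List.filter_eq_nil_iff.mpr (fun x _ => ?_)
    simp only [decide_eq_true_eq]
    omega

-- ===== VERDICT (by name: the statement is the Claim_ definition above) =====
theorem areas_in_range_spec : Claim_equal_areas_in_range := by
  intro start distance row _
  unfold Spec_areas_in_range areas_in_range areas_in_range_alt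
  simp only []
  rw [PySem.List.foldl_append_ite
        (fun x => start.2 - (distance - |x - start.1|) ≤ row ∧
                  row < start.2 + (distance - |x - start.1|) + 1)
        (fun x => (x, row))]
  rw [List.nil_append]
  have hc : (PySem.List.pyRange (start.1 - distance) (start.1 + distance + 1) 1).filter
      (fun x => decide (start.2 - (distance - |x - start.1|) ≤ row ∧
                        row < start.2 + (distance - |x - start.1|) + 1))
      = (PySem.List.pyRange (start.1 - distance) (start.1 + distance + 1) 1).filter
      (fun x => decide (start.1 - (distance - |row - start.2|) ≤ x ∧
                        x ≤ start.1 + (distance - |row - start.2|))) := by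
    refine List.filter_congr (fun x _ => ?_)
    rw [decide_eq_decide]
    rcases abs_cases (x - start.1) with ⟨h1, h2⟩ | ⟨h1, h2⟩ <;>
      rcases abs_cases (row - start.2) with ⟨h3, h4⟩ | ⟨h3, h4⟩ <;>
      constructor <;> intro h <;> omega
  rw [hc]
  have habs : (0 : Int) ≤ |row - start.2| := abs_nonneg _
  rw [pv_filter_window (start.1 - distance) (start.1 + distance + 1)
        (start.1 - (distance - |row - start.2|)) (start.1 + (distance - |row - start.2|))
        (by omega) (by omega)]
  by_cases hk : distance - |row - start.2| < 0
  · rw [if_pos hk, PySem.List.pyRange_one_eq_nil (by omega), List.map_nil]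
  · rw [if_neg hk]
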